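-- pv_equiv track=rewrite | github.com/Jasonmellet/GTM_data-enrichment | archive/2025-08-19/broadway_legacy/archive/check_contact_enrichment_simple.py | deduplicate_data
-- ===== SOURCE A (Python) =====
-- def deduplicate_data(data, headers):
--     """Remove duplicate entries based on organization and contact name."""
--     if not data or not headers:
--         return data
--
--     # Find column indices
--     org_idx = headers.index("organization_name") if "organization_name" in headers else -1
--     contact_idx = headers.index("contact_name") if "contact_name" in headers else -1
--     email_idx = headers.index("email") if "email" in headers else -1
--     is_direct_idx = headers.index("is_direct_email") if "is_direct_email" in headers else -1
--
--     # If we can't find the key columns, return the original data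
--     if org_idx < 0 or contact_idx < 0:
--         return data
--
--     # Use a dictionary to track unique entries
--     unique_entries = {}
--
--     for row in data:
--         if org_idx >= len(row) or contact_idx >= len(row):
--             continue
--
--         key = (row[org_idx], row[contact_idx])
--
--         # If this is the first time we've seen this key, add it
--         if key not in unique_entries:
--             unique_entries[key] = row
--         else:
--             # If we already have this key, prefer the row with direct email
--             existing_row = unique_entries[key]
--
--             if (is_direct_idx >= 0 and
--                 is_direct_idx < len(row) and
--                 row[is_direct_idx] == "True" and
--                 (is_direct_idx >= len(existing_row) or existing_row[is_direct_idx] != "True")):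
--                 unique_entries[key] = row
--
--     # Convert back to a list
--     return list(unique_entries.values())
-- ===== SOURCE B (Python) =====
-- def deduplicate_data(data, headers):
--     """Remove duplicate entries based on organization and contact name.
--
--     Two passes: first group all (sufficiently long) rows by (org, contact) in
--     first-seen order, then pick from each group the first row with a direct
--     email, falling back to the group's first row.
--     """
--     if not data or not headers:
--         return data
--
--     org_idx = headers.index("organization_name") if "organization_name" in headers else -1
--     contact_idx = headers.index("contact_name") if "contact_name" in headers else -1
--     is_direct_idx = headers.index("is_direct_email") if "is_direct_email" in headers else -1
--
--     if org_idx < 0 or contact_idx < 0: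
--         return data
--
--     # Pass 1: group rows by key, insertion-ordered.
--     groups = {}
--     for row in data:
--         if org_idx >= len(row) or contact_idx >= len(row):
--             continue
--         key = (row[org_idx], row[contact_idx])
--         groups[key] = groups.get(key, []) + [row]
--
--     def is_direct(r):
--         return 0 <= is_direct_idx < len(r) and r[is_direct_idx] == "True"
--
--     # Pass 2: select the first direct row of each group, else its first row.
--     return [next((r for r in rows if is_direct(r)), rows[0]) for rows in groups.values()]
-- ===== Notes on version B (the rewrite author's own statement) =====
-- stated objective: alternative
-- what changed: B separates the work into two passes — first group all rows by (organization, contact) key in first-seen order, then select each group's first direct-email row (falling back to the group's first row) — instead of A's single pass that keeps a running best row per key and decides replacement with a compound condition.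
import Mathlib
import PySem

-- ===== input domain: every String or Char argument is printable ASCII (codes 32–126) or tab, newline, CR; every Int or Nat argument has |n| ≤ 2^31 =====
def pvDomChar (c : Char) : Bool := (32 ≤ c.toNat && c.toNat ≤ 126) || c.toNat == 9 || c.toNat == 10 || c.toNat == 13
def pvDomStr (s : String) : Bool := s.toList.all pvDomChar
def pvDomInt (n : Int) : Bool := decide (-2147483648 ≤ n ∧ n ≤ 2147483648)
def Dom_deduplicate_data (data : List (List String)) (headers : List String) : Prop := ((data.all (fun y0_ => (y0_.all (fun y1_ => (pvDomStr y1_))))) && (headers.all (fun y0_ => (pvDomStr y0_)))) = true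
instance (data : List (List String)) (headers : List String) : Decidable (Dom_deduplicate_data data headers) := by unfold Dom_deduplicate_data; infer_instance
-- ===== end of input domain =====

-- B separates grouping from selection (group rows by key, then pick each group's first direct row,
-- else its first row) instead of A's single running-best dict update; objective: alternative decomposition.

-- `headers.index(name) if name in headers else -1`
def pvIdxOr (headers : List String) (name : String) : Int :=
  match PySem.List.index? headers name with
  | some n => (n : Int)
  | none => -1

-- ===== PORT A =====
def deduplicate_data (data : List (List String)) (headers : List String) : List (List String) :=
  if data = [] ∨ headers = [] then data
  else
    let org_idx := pvIdxOr headers "organization_name"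
    let contact_idx := pvIdxOr headers "contact_name"
    let _email_idx := pvIdxOr headers "email"
    let is_direct_idx := pvIdxOr headers "is_direct_email"
    if org_idx < 0 ∨ contact_idx < 0 then data
    else
      let unique_entries := data.foldl (fun d row =>
        if org_idx ≥ PySem.List.len row ∨ contact_idx ≥ PySem.List.len row then d
        else
          let key := (PySem.List.pyGetD row org_idx "", PySem.List.pyGetD row contact_idx "")
          if d.contains key = false then d.insert key row
          else
            let existing_row := d.getD key []
            if 0 ≤ is_direct_idx ∧ is_direct_idx < PySem.List.len row ∧
               PySem.List.pyGetD row is_direct_idx "" = "True" ∧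
               (is_direct_idx ≥ PySem.List.len existing_row ∨
                PySem.List.pyGetD existing_row is_direct_idx "" ≠ "True")
            then d.insert key row else d) PySem.Dict.empty
      unique_entries.values

-- ===== PORT B =====
-- `0 <= is_direct_idx < len(r) and r[is_direct_idx] == "True"`
def pvIsDirect (is_direct_idx : Int) (r : List String) : Bool :=
  decide (0 ≤ is_direct_idx) && decide (is_direct_idx < PySem.List.len r) &&
    (PySem.List.pyGetD r is_direct_idx "" == "True")

def deduplicate_data_alt (data : List (List String)) (headers : List String) : List (List String) :=
  if data = [] ∨ headers = [] then data
  else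
    let org_idx := pvIdxOr headers "organization_name"
    let contact_idx := pvIdxOr headers "contact_name"
    let is_direct_idx := pvIdxOr headers "is_direct_email"
    if org_idx < 0 ∨ contact_idx < 0 then data
    else
      -- Pass 1: group rows by key (first-seen order)
      let groups := data.foldl (fun g row =>
        if org_idx ≥ PySem.List.len row ∨ contact_idx ≥ PySem.List.len row then g
        else
          let key := (PySem.List.pyGetD row org_idx "", PySem.List.pyGetD row contact_idx "")
          g.insert key (g.getD key [] ++ [row])) PySem.Dict.empty
      -- Pass 2: first direct row of each group, else its first row
      groups.values.map (fun rows => ((rows.find? (pvIsDirect is_direct_idx)).getD (rows.headD [])))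

-- ===== PRECONDITION & SPEC =====
def Spec_deduplicate_data (data : List (List String)) (headers : List String) (out : List (List String)) : Prop := out = deduplicate_data_alt data headers
instance (data : List (List String)) (headers : List String) (out : List (List String)) : Decidable (Spec_deduplicate_data data headers out) := by unfold Spec_deduplicate_data; infer_instance

-- ===== CLAIM (what is proved, stated in full; the proofs are below) =====
def Claim_equal_deduplicate_data : Prop := ∀ (data : List (List String)) (headers : List String), Dom_deduplicate_data data headers → Spec_deduplicate_data data headers (deduplicate_data data headers)


-- ===== LEMMAS AND PROOFS =====

-- selection from a group: first direct row, else first row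
def pvSelect (idx : Int) (rows : List (List String)) : List String :=
  (rows.find? (pvIsDirect idx)).getD (rows.headD [])

lemma pvSelect_singleton (idx : Int) (r : List String) : pvSelect idx [r] = r := by
  unfold pvSelect
  cases h : pvIsDirect idx r <;> simp [List.find?, h]

-- A's replacement condition equals "row is direct and the stored row is not"
lemma pv_cond_iff (idx : Int) (row e : List String) :
    (0 ≤ idx ∧ idx < PySem.List.len row ∧ PySem.List.pyGetD row idx "" = "True" ∧
      (idx ≥ PySem.List.len e ∨ PySem.List.pyGetD e idx "" ≠ "True"))
    ↔ (pvIsDirect idx row = true ∧ pvIsDirect idx e = false) := by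
  simp [pvIsDirect, PySem.List.len_eq]
  constructor
  · rintro ⟨h0, h1, h2, h3⟩
    refine ⟨⟨⟨h0, h1⟩, h2⟩, ?_⟩
    intro h0' h1'
    rcases h3 with h | h
    · omega
    · exact h
  · rintro ⟨⟨⟨h0, h1⟩, h2⟩, h3⟩
    refine ⟨h0, h1, h2, ?_⟩
    by_cases hlt : (idx : Int) < (e.length : Int)
    · exact Or.inr (h3 h0 hlt)
    · exact Or.inl (by omega)

lemma pvSelect_append (idx : Int) (g : List (List String)) (r : List String) (hg : g ≠ []) :
    pvSelect idx (g ++ [r]) =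
      if pvIsDirect idx r = true ∧ pvIsDirect idx (pvSelect idx g) = false
      then r else pvSelect idx g := by
  unfold pvSelect
  rw [List.find?_append]
  cases hfind : g.find? (pvIsDirect idx) with
  | some d =>
    have hd : pvIsDirect idx d = true := List.find?_some hfind
    simp [hd]
  | none =>
    have hnd : ∀ x ∈ g, pvIsDirect idx x = false := by
      intro x hx
      exact Bool.eq_false_iff.mpr (List.find?_eq_none.mp hfind x hx)
    have hhead : g.headD [] ∈ g := by
      cases g with
      | nil => exact absurd rfl hg
      | cons a as => simp
    have hh : pvIsDirect idx (g.headD []) = false := hnd _ hhead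
    rw [List.headD_eq_head?] at hh
    cases hr : pvIsDirect idx r with
    | true =>
      simp [List.find?, hr, hh]
    | false =>
      simp [List.find?, hr, hh]
      cases g with
      | nil => exact absurd rfl hg
      | cons a as => simp

-- the loop invariant: A's dict items are B's dict items with each group replaced by its selection
lemma pv_loop_invariant (idx orgI contI : Int) (rest : List (List String))
    (dA : PySem.Dict (String × String) (List String))
    (dB : PySem.Dict (String × String) (List (List String)))
    (hinv : dA.items = dB.items.map (fun p => (p.1, pvSelect idx p.2)))
    (hnodup : dB.keys.Nodup)
    (hne : ∀ p ∈ dB.items, p.2 ≠ []) :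
    (rest.foldl (fun d row =>
        if orgI ≥ PySem.List.len row ∨ contI ≥ PySem.List.len row then d
        else
          let key := (PySem.List.pyGetD row orgI "", PySem.List.pyGetD row contI "")
          if d.contains key = false then d.insert key row
          else
            let existing_row := d.getD key []
            if 0 ≤ idx ∧ idx < PySem.List.len row ∧
               PySem.List.pyGetD row idx "" = "True" ∧
               (idx ≥ PySem.List.len existing_row ∨
                PySem.List.pyGetD existing_row idx "" ≠ "True")
            then d.insert key row else d) dA).items
    = ((rest.foldl (fun g row =>
        if orgI ≥ PySem.List.len row ∨ contI ≥ PySem.List.len row then g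
        else
          let key := (PySem.List.pyGetD row orgI "", PySem.List.pyGetD row contI "")
          g.insert key (g.getD key [] ++ [row])) dB).items.map
          (fun p => (p.1, pvSelect idx p.2))) := by
  induction rest generalizing dA dB with
  | nil => simpa using hinv
  | cons row rest ih =>
    simp only [List.foldl_cons]
    have hkeys : dA.keys = dB.keys := by
      simp only [PySem.Dict.keys, hinv, List.map_map]
      rfl
    by_cases hskip : orgI ≥ PySem.List.len row ∨ contI ≥ PySem.List.len row
    · simp only [if_pos hskip]
      exact ih dA dB hinv hnodup hne
    · simp only [if_neg hskip]
      set k : String × String :=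
        (PySem.List.pyGetD row orgI "", PySem.List.pyGetD row contI "") with hk
      have hcont : dA.contains k = dB.contains k := by
        rw [PySem.Dict.contains_eq_decide_mem_keys dA k, PySem.Dict.contains_eq_decide_mem_keys dB k, hkeys]
      by_cases hc : dB.contains k = false
      · -- new key: both append
        have hcA : dA.contains k = false := by rw [hcont]; exact hc
        have hkmem : k ∉ dB.keys := fun hmem => by
          simp [(PySem.Dict.contains_iff_mem_keys dB k).mpr hmem] at hc
        simp only [if_pos hcA]
        refine ih _ _ ?_ ?_ ?_
        · rw [PySem.Dict.items_insert_of_not_contains dA _ hcA,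
              PySem.Dict.items_insert_of_not_contains dB _ hc,
              PySem.Dict.getD_of_not_contains dB _ hc]
          simp [hinv, pvSelect_singleton]
        · rw [PySem.Dict.keys_insert_of_not_contains dB _ hc]
          refine List.Nodup.append hnodup (List.nodup_singleton k) ?_
          intro a ha hb
          rw [List.mem_singleton] at hb
          exact hkmem (hb ▸ ha)
        · intro p hp
          rw [PySem.Dict.items_insert_of_not_contains dB _ hc] at hp
          rcases List.mem_append.mp hp with h | h
          · exact hne p h
          · simp only [List.mem_singleton] at h
            subst h
            simp
      · -- existing key
        have hcB : dB.contains k = true := by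
          cases h : dB.contains k
          · exact absurd h hc
          · rfl
        have hcA : dA.contains k = true := by rw [hcont]; exact hcB
        have hcA' : ¬ dA.contains k = false := by simp [hcA]
        simp only [if_neg hcA']
        set g : List (List String) := dB.getD k [] with hg
        have hget : dB.get? k = some g := by
          cases hq : dB.get? k with
          | none =>
            have h2 := (PySem.Dict.get?_eq_none_iff_contains dB k).mp hq
            rw [hcB] at h2
            exact absurd h2 (by simp)
          | some v =>
            rw [hg, PySem.Dict.getD_of_get?_eq_some dB [] hq]
        have hgmem : (k, g) ∈ dB.items := PySem.Dict.mem_items_of_get?_eq_some dB hget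
        have hAnodup : dA.keys.Nodup := by rw [hkeys]; exact hnodup
        have hgne : g ≠ [] := hne _ hgmem
        have hgetA : dA.getD k [] = pvSelect idx g := by
          have hmemA : (k, pvSelect idx g) ∈ dA.items := by
            rw [hinv]
            exact List.mem_map.mpr ⟨(k, g), hgmem, rfl⟩
          exact PySem.Dict.getD_of_mem_items dA hmemA hAnodup []
        -- the per-item congruence, shared by both branches
        have hval : ∀ k' g', (k', g') ∈ dB.items → k' = k → g' = g := by
          intro k' g' hp hp1
          subst hp1
          have h2 := PySem.Dict.get?_of_mem_items dB hp hnodup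
          rw [hget] at h2
          exact (Option.some.inj h2).symm
        by_cases hcond : pvIsDirect idx row = true ∧ pvIsDirect idx (pvSelect idx g) = false
        · have hcondA : (0 ≤ idx ∧ idx < PySem.List.len row ∧
               PySem.List.pyGetD row idx "" = "True" ∧
               (idx ≥ PySem.List.len (dA.getD k []) ∨
                PySem.List.pyGetD (dA.getD k []) idx "" ≠ "True")) := by
            rw [hgetA]
            exact (pv_cond_iff idx row (pvSelect idx g)).mpr hcond
          simp only [if_pos hcondA]
          refine ih _ _ ?_ ?_ ?_
          · rw [PySem.Dict.items_insert_of_contains dA _ hcA,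
                PySem.Dict.items_insert_of_contains dB _ hcB, hinv, List.map_map, List.map_map]
            refine List.map_congr_left ?_
            rintro ⟨k', g'⟩ hp
            simp only [Function.comp]
            by_cases hkk : (k' == k) = true
            · have hk' : k' = k := by exact eq_of_beq hkk
              have hg' : g' = g := hval _ _ hp hk'
              subst hk'; subst hg'
              simp [pvSelect_append idx g row hgne, hcond.1, hcond.2]
            · simp [hkk]
          · rw [PySem.Dict.keys_insert_of_contains dB _ hcB]
            exact hnodup
          · intro p hp
            rw [PySem.Dict.items_insert_of_contains dB _ hcB] at hp
            rcases List.mem_map.mp hp with ⟨q, hq, hqe⟩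
            by_cases hqk : (q.1 == k) = true
            · rw [← hqe]; simp [hqk]
            · rw [← hqe]; simp [hqk]; exact hne q hq
        · have hcondA : ¬ (0 ≤ idx ∧ idx < PySem.List.len row ∧
               PySem.List.pyGetD row idx "" = "True" ∧
               (idx ≥ PySem.List.len (dA.getD k []) ∨
                PySem.List.pyGetD (dA.getD k []) idx "" ≠ "True")) := by
            rw [hgetA]
            intro h
            exact hcond ((pv_cond_iff idx row (pvSelect idx g)).mp h)
          simp only [if_neg hcondA]
          refine ih _ _ ?_ ?_ ?_
          · rw [PySem.Dict.items_insert_of_contains dB _ hcB, hinv, List.map_map]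
            refine List.map_congr_left ?_
            rintro ⟨k', g'⟩ hp
            simp only [Function.comp]
            by_cases hkk : (k' == k) = true
            · have hk' : k' = k := by exact eq_of_beq hkk
              have hg' : g' = g := hval _ _ hp hk'
              subst hk'; subst hg'
              simp [pvSelect_append idx g row hgne, hcond]
            · simp [hkk]
          · rw [PySem.Dict.keys_insert_of_contains dB _ hcB]
            exact hnodup
          · intro p hp
            rw [PySem.Dict.items_insert_of_contains dB _ hcB] at hp
            rcases List.mem_map.mp hp with ⟨q, hq, hqe⟩
            by_cases hqk : (q.1 == k) = true
            · rw [← hqe]; simp [hqk]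
            · rw [← hqe]; simp [hqk]; exact hne q hq

-- ===== VERDICT (by name: the statement is the Claim_ definition above) =====
theorem deduplicate_data_spec : Claim_equal_deduplicate_data := by
  intro data headers _
  unfold Spec_deduplicate_data deduplicate_data deduplicate_data_alt
  by_cases h0 : data = [] ∨ headers = []
  · simp [h0]
  · simp only [if_neg h0]
    by_cases h1 : pvIdxOr headers "organization_name" < 0 ∨ pvIdxOr headers "contact_name" < 0
    · simp [h1]
    · simp only [if_neg h1]
      have := pv_loop_invariant (pvIdxOr headers "is_direct_email")
        (pvIdxOr headers "organization_name") (pvIdxOr headers "contact_name") data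
        PySem.Dict.empty PySem.Dict.empty (by rfl) (by simp) (by intro p hp; simp [PySem.Dict.empty] at hp)
      simp only [PySem.Dict.values, this, List.map_map]
      rfl
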